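-- pv_equiv track=rewrite | github.com/royjyotish281/Fusion-360-body-renamer- | fusion360_body_renamer.py | _process_user_hint
-- ===== SOURCE A (Python) =====
-- def _process_user_hint(hint: str, default_context: str) -> str:
--     """Process user hint to determine naming category"""
--     if not hint:
--         return default_context + '_basic'
--
--     hint_lower = hint.lower()
--
--     # Keyword matching
--     if any(word in hint_lower for word in ['car', 'auto', 'engine', 'brake', 'wheel']):
--         return 'automotive'
--     elif any(word in hint_lower for word in ['circuit', 'pcb', 'electronic', 'connector']):
--         return 'electronics'
--     elif any(word in hint_lower for word in ['table', 'chair', 'drawer', 'furniture']):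
--         return 'furniture'
--     elif any(word in hint_lower for word in ['building', 'beam', 'column', 'wall']):
--         return 'architecture'
--     elif any(word in hint_lower for word in ['gear', 'shaft', 'bearing', 'machine']):
--         return 'mechanical_advanced'
--     elif any(word in hint_lower for word in ['bolt', 'screw', 'nut', 'fastener']):
--         return 'fasteners'
--
--     return default_context + '_basic'
-- ===== SOURCE B (Python) =====
-- _KEYWORD_RANK = {
--     'car': 0, 'auto': 0, 'engine': 0, 'brake': 0, 'wheel': 0,
--     'circuit': 1, 'pcb': 1, 'electronic': 1, 'connector': 1,
--     'table': 2, 'chair': 2, 'drawer': 2, 'furniture': 2,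
--     'building': 3, 'beam': 3, 'column': 3, 'wall': 3,
--     'gear': 4, 'shaft': 4, 'bearing': 4, 'machine': 4,
--     'bolt': 5, 'screw': 5, 'nut': 5, 'fastener': 5,
-- }
--
-- _CATEGORIES = ['automotive', 'electronics', 'furniture', 'architecture',
--                'mechanical_advanced', 'fasteners']
--
--
-- def _process_user_hint(hint: str, default_context: str) -> str:
--     """Collect the ranks of ALL matching keywords, then return the
--     best-ranked category; no match (including the empty hint) gives the default.
--     Correct because A returns the first matching category in a fixed priority
--     order, which is exactly the minimum rank among all matches."""
--     hint_lower = hint.lower()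
--     ranks = [rank for word, rank in _KEYWORD_RANK.items() if word in hint_lower]
--     if not ranks:
--         return default_context + '_basic'
--     return _CATEGORIES[min(ranks)]
-- ===== Notes on version B (the rewrite author's own statement) =====
-- stated objective: alternative
-- what changed: Replaced the prioritized if/elif cascade with early return by a flat keyword-to-rank dictionary: one comprehension collects the ranks of ALL matching keywords, and min(ranks) indexes the category list (no match, including the empty hint, falls through to the default).
import Mathlib
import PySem

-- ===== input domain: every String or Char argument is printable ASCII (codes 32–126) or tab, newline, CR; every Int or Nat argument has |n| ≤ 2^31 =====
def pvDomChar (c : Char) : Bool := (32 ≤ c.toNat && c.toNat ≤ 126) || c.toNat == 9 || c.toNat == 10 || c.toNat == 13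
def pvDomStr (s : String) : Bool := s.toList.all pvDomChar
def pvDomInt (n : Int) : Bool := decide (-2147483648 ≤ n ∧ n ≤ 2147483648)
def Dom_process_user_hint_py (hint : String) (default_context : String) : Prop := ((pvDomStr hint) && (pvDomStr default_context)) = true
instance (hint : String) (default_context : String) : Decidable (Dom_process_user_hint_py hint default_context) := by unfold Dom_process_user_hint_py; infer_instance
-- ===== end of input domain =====

-- B replaces A's prioritized if/elif cascade by a flat keyword->rank map: it collects the ranks of ALL matching keywords and takes the minimum (alternative; same cost).


-- ===== PORT A =====
def process_user_hint_py (hint : String) (default_context : String) : String :=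
  if hint = "" then default_context ++ "_basic"
  else
    let hint_lower := PySem.Str.lower hint
    if ["car", "auto", "engine", "brake", "wheel"].any (fun w => PySem.Str.isIn w hint_lower) then
      "automotive"
    else if ["circuit", "pcb", "electronic", "connector"].any (fun w => PySem.Str.isIn w hint_lower) then
      "electronics"
    else if ["table", "chair", "drawer", "furniture"].any (fun w => PySem.Str.isIn w hint_lower) then
      "furniture"
    else if ["building", "beam", "column", "wall"].any (fun w => PySem.Str.isIn w hint_lower) then
      "architecture"
    else if ["gear", "shaft", "bearing", "machine"].any (fun w => PySem.Str.isIn w hint_lower) then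
      "mechanical_advanced"
    else if ["bolt", "screw", "nut", "fastener"].any (fun w => PySem.Str.isIn w hint_lower) then
      "fasteners"
    else
      default_context ++ "_basic"

-- ===== PORT B =====
-- the _KEYWORD_RANK dict (insertion order) as an association list
def pvKwRank : List (String × Int) :=
  [("car", 0), ("auto", 0), ("engine", 0), ("brake", 0), ("wheel", 0),
   ("circuit", 1), ("pcb", 1), ("electronic", 1), ("connector", 1),
   ("table", 2), ("chair", 2), ("drawer", 2), ("furniture", 2),
   ("building", 3), ("beam", 3), ("column", 3), ("wall", 3),
   ("gear", 4), ("shaft", 4), ("bearing", 4), ("machine", 4),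
   ("bolt", 5), ("screw", 5), ("nut", 5), ("fastener", 5)]

def pvCats : List String :=
  ["automotive", "electronics", "furniture", "architecture", "mechanical_advanced", "fasteners"]

-- the comprehension '[rank for word, rank in _KEYWORD_RANK.items() if word in hint_lower]'
def pvRanks (hint_lower : String) : List Int :=
  (pvKwRank.filter (fun p => PySem.Str.isIn p.1 hint_lower)).map Prod.snd

def process_user_hint_py_alt (hint : String) (default_context : String) : String :=
  let hint_lower := PySem.Str.lower hint
  match PySem.List.min? (pvRanks hint_lower) (fun r => r) with
  | none => default_context ++ "_basic"                      -- 'if not ranks'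
  | some r => (PySem.List.pyGet? pvCats r).getD ""           -- '_CATEGORIES[min(ranks)]'; the index is always in range 0..5

-- ===== PRECONDITION & SPEC =====
def Spec_process_user_hint_py (hint : String) (default_context : String) (out : String) : Prop := out = process_user_hint_py_alt hint default_context
instance (hint : String) (default_context : String) (out : String) : Decidable (Spec_process_user_hint_py hint default_context out) := by unfold Spec_process_user_hint_py; infer_instance

-- ===== CLAIM (what is proved, stated in full; the proofs are below) =====
def Claim_equal_process_user_hint_py : Prop := ∀ (hint : String) (default_context : String), Dom_process_user_hint_py hint default_context → Spec_process_user_hint_py hint default_context (process_user_hint_py hint default_context)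

-- ===== LEMMAS AND PROOFS =====

def pvB0 (h : String) : Bool := PySem.Str.isIn "car" h || PySem.Str.isIn "auto" h || PySem.Str.isIn "engine" h || PySem.Str.isIn "brake" h || PySem.Str.isIn "wheel" h
def pvB1 (h : String) : Bool := PySem.Str.isIn "circuit" h || PySem.Str.isIn "pcb" h || PySem.Str.isIn "electronic" h || PySem.Str.isIn "connector" h
def pvB2 (h : String) : Bool := PySem.Str.isIn "table" h || PySem.Str.isIn "chair" h || PySem.Str.isIn "drawer" h || PySem.Str.isIn "furniture" h
def pvB3 (h : String) : Bool := PySem.Str.isIn "building" h || PySem.Str.isIn "beam" h || PySem.Str.isIn "column" h || PySem.Str.isIn "wall" h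
def pvB4 (h : String) : Bool := PySem.Str.isIn "gear" h || PySem.Str.isIn "shaft" h || PySem.Str.isIn "bearing" h || PySem.Str.isIn "machine" h
def pvB5 (h : String) : Bool := PySem.Str.isIn "bolt" h || PySem.Str.isIn "screw" h || PySem.Str.isIn "nut" h || PySem.Str.isIn "fastener" h
set_option maxHeartbeats 1000000 in
theorem pv_mem_ranks (h : String) (r : Int) :
    r ∈ pvRanks h ↔
      (r = 0 ∧ pvB0 h = true) ∨ (r = 1 ∧ pvB1 h = true) ∨ (r = 2 ∧ pvB2 h = true) ∨
      (r = 3 ∧ pvB3 h = true) ∨ (r = 4 ∧ pvB4 h = true) ∨ (r = 5 ∧ pvB5 h = true) := by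
  simp only [pvRanks, pvKwRank, List.mem_map, List.mem_filter, List.mem_cons,
    List.not_mem_nil, or_false, pvB0, pvB1, pvB2, pvB3, pvB4, pvB5, Bool.or_eq_true]
  constructor
  · rintro ⟨⟨w, rk⟩, ⟨hm, hin⟩, rfl⟩
    simp only [Prod.mk.injEq] at hm
    rcases hm with ⟨rfl, rfl⟩ | hm
    · simp_all
    rcases hm with ⟨rfl, rfl⟩ | hm
    · simp_all
    rcases hm with ⟨rfl, rfl⟩ | hm
    · simp_all
    rcases hm with ⟨rfl, rfl⟩ | hm
    · simp_all
    rcases hm with ⟨rfl, rfl⟩ | hm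
    · simp_all
    rcases hm with ⟨rfl, rfl⟩ | hm
    · simp_all
    rcases hm with ⟨rfl, rfl⟩ | hm
    · simp_all
    rcases hm with ⟨rfl, rfl⟩ | hm
    · simp_all
    rcases hm with ⟨rfl, rfl⟩ | hm
    · simp_all
    rcases hm with ⟨rfl, rfl⟩ | hm
    · simp_all
    rcases hm with ⟨rfl, rfl⟩ | hm
    · simp_all
    rcases hm with ⟨rfl, rfl⟩ | hm
    · simp_all
    rcases hm with ⟨rfl, rfl⟩ | hm
    · simp_all
    rcases hm with ⟨rfl, rfl⟩ | hm
    · simp_all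
    rcases hm with ⟨rfl, rfl⟩ | hm
    · simp_all
    rcases hm with ⟨rfl, rfl⟩ | hm
    · simp_all
    rcases hm with ⟨rfl, rfl⟩ | hm
    · simp_all
    rcases hm with ⟨rfl, rfl⟩ | hm
    · simp_all
    rcases hm with ⟨rfl, rfl⟩ | hm
    · simp_all
    rcases hm with ⟨rfl, rfl⟩ | hm
    · simp_all
    rcases hm with ⟨rfl, rfl⟩ | hm
    · simp_all
    rcases hm with ⟨rfl, rfl⟩ | hm
    · simp_all
    rcases hm with ⟨rfl, rfl⟩ | hm
    · simp_all
    rcases hm with ⟨rfl, rfl⟩ | hm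
    · simp_all
    obtain ⟨rfl, rfl⟩ := hm
    simp_all
  · rintro (⟨rfl, hx⟩|⟨rfl, hx⟩|⟨rfl, hx⟩|⟨rfl, hx⟩|⟨rfl, hx⟩|⟨rfl, hx⟩)
    · rcases hx with ((((hx|hx)|hx)|hx)|hx)
      · exact ⟨("car", 0), ⟨by decide, hx⟩, rfl⟩
      · exact ⟨("auto", 0), ⟨by decide, hx⟩, rfl⟩
      · exact ⟨("engine", 0), ⟨by decide, hx⟩, rfl⟩
      · exact ⟨("brake", 0), ⟨by decide, hx⟩, rfl⟩
      · exact ⟨("wheel", 0), ⟨by decide, hx⟩, rfl⟩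
    · rcases hx with (((hx|hx)|hx)|hx)
      · exact ⟨("circuit", 1), ⟨by decide, hx⟩, rfl⟩
      · exact ⟨("pcb", 1), ⟨by decide, hx⟩, rfl⟩
      · exact ⟨("electronic", 1), ⟨by decide, hx⟩, rfl⟩
      · exact ⟨("connector", 1), ⟨by decide, hx⟩, rfl⟩
    · rcases hx with (((hx|hx)|hx)|hx)
      · exact ⟨("table", 2), ⟨by decide, hx⟩, rfl⟩
      · exact ⟨("chair", 2), ⟨by decide, hx⟩, rfl⟩
      · exact ⟨("drawer", 2), ⟨by decide, hx⟩, rfl⟩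
      · exact ⟨("furniture", 2), ⟨by decide, hx⟩, rfl⟩
    · rcases hx with (((hx|hx)|hx)|hx)
      · exact ⟨("building", 3), ⟨by decide, hx⟩, rfl⟩
      · exact ⟨("beam", 3), ⟨by decide, hx⟩, rfl⟩
      · exact ⟨("column", 3), ⟨by decide, hx⟩, rfl⟩
      · exact ⟨("wall", 3), ⟨by decide, hx⟩, rfl⟩
    · rcases hx with (((hx|hx)|hx)|hx)
      · exact ⟨("gear", 4), ⟨by decide, hx⟩, rfl⟩
      · exact ⟨("shaft", 4), ⟨by decide, hx⟩, rfl⟩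
      · exact ⟨("bearing", 4), ⟨by decide, hx⟩, rfl⟩
      · exact ⟨("machine", 4), ⟨by decide, hx⟩, rfl⟩
    · rcases hx with (((hx|hx)|hx)|hx)
      · exact ⟨("bolt", 5), ⟨by decide, hx⟩, rfl⟩
      · exact ⟨("screw", 5), ⟨by decide, hx⟩, rfl⟩
      · exact ⟨("nut", 5), ⟨by decide, hx⟩, rfl⟩
      · exact ⟨("fastener", 5), ⟨by decide, hx⟩, rfl⟩


-- pvB_k restated as the '.any' tests that port A branches on
theorem pvB_any (h : String) :
    pvB0 h = ["car", "auto", "engine", "brake", "wheel"].any (fun w => PySem.Str.isIn w h) ∧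
    pvB1 h = ["circuit", "pcb", "electronic", "connector"].any (fun w => PySem.Str.isIn w h) ∧
    pvB2 h = ["table", "chair", "drawer", "furniture"].any (fun w => PySem.Str.isIn w h) ∧
    pvB3 h = ["building", "beam", "column", "wall"].any (fun w => PySem.Str.isIn w h) ∧
    pvB4 h = ["gear", "shaft", "bearing", "machine"].any (fun w => PySem.Str.isIn w h) ∧
    pvB5 h = ["bolt", "screw", "nut", "fastener"].any (fun w => PySem.Str.isIn w h) := by
  simp [pvB0, pvB1, pvB2, pvB3, pvB4, pvB5, List.any_cons, Bool.or_assoc]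

-- the minimum collected rank is the first category with a match
theorem pv_min_some (h : String) (k : Int)
    (hk : (k = 0 ∧ pvB0 h = true) ∨ (k = 1 ∧ pvB1 h = true) ∨ (k = 2 ∧ pvB2 h = true) ∨
          (k = 3 ∧ pvB3 h = true) ∨ (k = 4 ∧ pvB4 h = true) ∨ (k = 5 ∧ pvB5 h = true))
    (hlt : ∀ j : Int, j < k → ¬ ((j = 0 ∧ pvB0 h = true) ∨ (j = 1 ∧ pvB1 h = true) ∨ (j = 2 ∧ pvB2 h = true) ∨
          (j = 3 ∧ pvB3 h = true) ∨ (j = 4 ∧ pvB4 h = true) ∨ (j = 5 ∧ pvB5 h = true))) :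
    PySem.List.min? (pvRanks h) (fun r => r) = some k := by
  have hkmem : k ∈ pvRanks h := (pv_mem_ranks h k).2 hk
  cases e : PySem.List.min? (pvRanks h) (fun r => r) with
  | none =>
      rw [PySem.List.min?_eq_none_iff] at e
      rw [e] at hkmem
      simp at hkmem
  | some m =>
      have hmmem := PySem.List.min?_mem e
      have hmin := PySem.List.min?_isMin e k hkmem
      have hmch := (pv_mem_ranks h m).1 hmmem
      have : ¬ m < k := fun hlt' => hlt m hlt' hmch
      have : m = k := by omega
      rw [this]

theorem pv_min_none (h : String)
    (h0 : ¬ pvB0 h = true) (h1 : ¬ pvB1 h = true) (h2 : ¬ pvB2 h = true)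
    (h3 : ¬ pvB3 h = true) (h4 : ¬ pvB4 h = true) (h5 : ¬ pvB5 h = true) :
    PySem.List.min? (pvRanks h) (fun r => r) = none := by
  have : pvRanks h = [] := by
    rw [List.eq_nil_iff_forall_not_mem]
    intro r hr
    rcases (pv_mem_ranks h r).1 hr with ⟨_, hb⟩|⟨_, hb⟩|⟨_, hb⟩|⟨_, hb⟩|⟨_, hb⟩|⟨_, hb⟩ <;> tauto
  rw [this, PySem.List.min?_eq_none_iff]

-- the six category lookups, evaluated
theorem pv_cat_val :
    (PySem.List.pyGet? pvCats 0).getD "" = "automotive" ∧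
    (PySem.List.pyGet? pvCats 1).getD "" = "electronics" ∧
    (PySem.List.pyGet? pvCats 2).getD "" = "furniture" ∧
    (PySem.List.pyGet? pvCats 3).getD "" = "architecture" ∧
    (PySem.List.pyGet? pvCats 4).getD "" = "mechanical_advanced" ∧
    (PySem.List.pyGet? pvCats 5).getD "" = "fasteners" := by decide

theorem pv_ranks_empty : PySem.List.min? (pvRanks (PySem.Str.lower "")) (fun r => r) = none := by decide

-- ===== VERDICT (by name: the statement is the Claim_ definition above) =====
theorem process_user_hint_py_spec : Claim_equal_process_user_hint_py := by
  intro hint dc _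
  unfold Spec_process_user_hint_py process_user_hint_py process_user_hint_py_alt
  by_cases hh : hint = ""
  · subst hh
    simp [pv_ranks_empty]
  · rw [if_neg hh]
    dsimp only
    obtain ⟨e0, e1, e2, e3, e4, e5⟩ := pvB_any (PySem.Str.lower hint)
    rw [← e0, ← e1, ← e2, ← e3, ← e4, ← e5]
    obtain ⟨c0, c1, c2, c3, c4, c5⟩ := pv_cat_val
    by_cases hb0 : pvB0 (PySem.Str.lower hint) = true
    · have hmin : PySem.List.min? (pvRanks (PySem.Str.lower hint)) (fun r => r) = some 0 := by
        refine pv_min_some _ 0 (Or.inl ⟨rfl, hb0⟩) ?_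
        rintro j hj (⟨rfl, hb⟩|⟨rfl, hb⟩|⟨rfl, hb⟩|⟨rfl, hb⟩|⟨rfl, hb⟩|⟨rfl, hb⟩)
        · omega
        · omega
        · omega
        · omega
        · omega
        · omega
      rw [if_pos hb0, hmin]
      exact c0.symm
    by_cases hb1 : pvB1 (PySem.Str.lower hint) = true
    · have hmin : PySem.List.min? (pvRanks (PySem.Str.lower hint)) (fun r => r) = some 1 := by
        refine pv_min_some _ 1 (Or.inr (Or.inl ⟨rfl, hb1⟩)) ?_
        rintro j hj (⟨rfl, hb⟩|⟨rfl, hb⟩|⟨rfl, hb⟩|⟨rfl, hb⟩|⟨rfl, hb⟩|⟨rfl, hb⟩)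
        · exact hb0 hb
        · omega
        · omega
        · omega
        · omega
        · omega
      rw [if_neg hb0, if_pos hb1, hmin]
      exact c1.symm
    by_cases hb2 : pvB2 (PySem.Str.lower hint) = true
    · have hmin : PySem.List.min? (pvRanks (PySem.Str.lower hint)) (fun r => r) = some 2 := by
        refine pv_min_some _ 2 (Or.inr (Or.inr (Or.inl ⟨rfl, hb2⟩))) ?_
        rintro j hj (⟨rfl, hb⟩|⟨rfl, hb⟩|⟨rfl, hb⟩|⟨rfl, hb⟩|⟨rfl, hb⟩|⟨rfl, hb⟩)
        · exact hb0 hb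
        · exact hb1 hb
        · omega
        · omega
        · omega
        · omega
      rw [if_neg hb0, if_neg hb1, if_pos hb2, hmin]
      exact c2.symm
    by_cases hb3 : pvB3 (PySem.Str.lower hint) = true
    · have hmin : PySem.List.min? (pvRanks (PySem.Str.lower hint)) (fun r => r) = some 3 := by
        refine pv_min_some _ 3 (Or.inr (Or.inr (Or.inr (Or.inl ⟨rfl, hb3⟩)))) ?_
        rintro j hj (⟨rfl, hb⟩|⟨rfl, hb⟩|⟨rfl, hb⟩|⟨rfl, hb⟩|⟨rfl, hb⟩|⟨rfl, hb⟩)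
        · exact hb0 hb
        · exact hb1 hb
        · exact hb2 hb
        · omega
        · omega
        · omega
      rw [if_neg hb0, if_neg hb1, if_neg hb2, if_pos hb3, hmin]
      exact c3.symm
    by_cases hb4 : pvB4 (PySem.Str.lower hint) = true
    · have hmin : PySem.List.min? (pvRanks (PySem.Str.lower hint)) (fun r => r) = some 4 := by
        refine pv_min_some _ 4 (Or.inr (Or.inr (Or.inr (Or.inr (Or.inl ⟨rfl, hb4⟩))))) ?_
        rintro j hj (⟨rfl, hb⟩|⟨rfl, hb⟩|⟨rfl, hb⟩|⟨rfl, hb⟩|⟨rfl, hb⟩|⟨rfl, hb⟩)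
        · exact hb0 hb
        · exact hb1 hb
        · exact hb2 hb
        · exact hb3 hb
        · omega
        · omega
      rw [if_neg hb0, if_neg hb1, if_neg hb2, if_neg hb3, if_pos hb4, hmin]
      exact c4.symm
    by_cases hb5 : pvB5 (PySem.Str.lower hint) = true
    · have hmin : PySem.List.min? (pvRanks (PySem.Str.lower hint)) (fun r => r) = some 5 := by
        refine pv_min_some _ 5 (Or.inr (Or.inr (Or.inr (Or.inr (Or.inr ⟨rfl, hb5⟩))))) ?_
        rintro j hj (⟨rfl, hb⟩|⟨rfl, hb⟩|⟨rfl, hb⟩|⟨rfl, hb⟩|⟨rfl, hb⟩|⟨rfl, hb⟩)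
        · exact hb0 hb
        · exact hb1 hb
        · exact hb2 hb
        · exact hb3 hb
        · exact hb4 hb
        · omega
      rw [if_neg hb0, if_neg hb1, if_neg hb2, if_neg hb3, if_neg hb4, if_pos hb5, hmin]
      exact c5.symm
    · rw [if_neg hb0, if_neg hb1, if_neg hb2, if_neg hb3, if_neg hb4, if_neg hb5,
         pv_min_none _ hb0 hb1 hb2 hb3 hb4 hb5]
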